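-- pv_equiv track=rewrite | github.com/DListvin/Indigo | IndigoDev/GameSide/MapEngine.py | coordsGridLocalToNumber
-- ===== SOURCE A (Python) =====
-- ChunkSize = 16
--
-- ChunkLength = ChunkSize * 2 - 1
--
-- def coordsGridLocalToNumber(argX, argY, argZ):
--     rawNumber = argZ + ChunkSize - 1
--     if argZ > 0:
--         collNumber = argX + ChunkSize - 1
--     else:
--         collNumber = argY + ChunkSize - 1
--
--     for i in range(rawNumber):
--         collNumber += ChunkSize + i if i < ChunkSize else ChunkLength - 1 - (i - ChunkSize)
--
--     return collNumber
-- ===== SOURCE B (Python) =====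
-- ChunkSize = 16
-- ChunkLength = ChunkSize * 2 - 1
--
-- def coordsGridLocalToNumber(argX, argY, argZ):
--     base = (argX if argZ > 0 else argY) + ChunkSize - 1
--     n = argZ + ChunkSize - 1
--     if n <= 0:
--         s = 0
--     elif n <= ChunkSize:
--         s = ChunkSize * n + n * (n - 1) // 2
--     else:
--         m = n - ChunkSize
--         s = ChunkSize * ChunkSize + ChunkSize * (ChunkSize - 1) // 2 \
--             + (ChunkLength - 1) * m - m * (m - 1) // 2
--     return base + s
-- ===== Notes on version B (the rewrite author's own statement) =====
-- stated objective: faster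
-- what changed: B replaces A's O(argZ) loop summing a piecewise-linear increment with the closed-form arithmetic-series (triangular-number) sum, computed in O(1).
import Mathlib
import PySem

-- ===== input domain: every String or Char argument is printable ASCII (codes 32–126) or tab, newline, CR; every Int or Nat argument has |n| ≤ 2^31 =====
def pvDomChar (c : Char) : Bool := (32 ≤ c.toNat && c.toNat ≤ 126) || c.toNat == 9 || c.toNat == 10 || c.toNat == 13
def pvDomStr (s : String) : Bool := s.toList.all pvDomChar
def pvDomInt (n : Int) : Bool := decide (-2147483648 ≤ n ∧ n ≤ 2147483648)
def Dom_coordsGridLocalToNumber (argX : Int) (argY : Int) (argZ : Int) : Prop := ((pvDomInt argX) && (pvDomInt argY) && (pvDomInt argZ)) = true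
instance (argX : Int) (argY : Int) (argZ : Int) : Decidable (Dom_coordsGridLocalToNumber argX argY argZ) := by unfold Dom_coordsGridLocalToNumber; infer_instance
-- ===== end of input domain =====

-- B replaces A's O(argZ) loop with the closed-form arithmetic-series sum (O(1)).

def ChunkSize : Int := 16

def ChunkLength : Int := ChunkSize * 2 - 1

-- ===== PORT A =====
-- the loop 'for i in range(rawNumber): collNumber += …' as a foldl over range(rawNumber)
def coordsGridLocalToNumber (argX : Int) (argY : Int) (argZ : Int) : Int :=
  let rawNumber := argZ + ChunkSize - 1
  let collNumber := if argZ > 0 then argX + ChunkSize - 1 else argY + ChunkSize - 1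
  (PySem.List.pyRange 0 rawNumber 1).foldl
    (fun c i => c + (if i < ChunkSize then ChunkSize + i else ChunkLength - 1 - (i - ChunkSize)))
    collNumber

-- ===== PORT B =====
def coordsGridLocalToNumber_alt (argX : Int) (argY : Int) (argZ : Int) : Int :=
  let base := (if argZ > 0 then argX else argY) + ChunkSize - 1
  let n := argZ + ChunkSize - 1
  let s :=
    if n ≤ 0 then 0
    else if n ≤ ChunkSize then ChunkSize * n + n * (n - 1) / 2
    else
      let m := n - ChunkSize
      ChunkSize * ChunkSize + ChunkSize * (ChunkSize - 1) / 2
        + (ChunkLength - 1) * m - m * (m - 1) / 2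
  base + s

-- ===== PRECONDITION & SPEC =====
def Spec_coordsGridLocalToNumber (argX : Int) (argY : Int) (argZ : Int) (out : Int) : Prop := out = coordsGridLocalToNumber_alt argX argY argZ
instance (argX : Int) (argY : Int) (argZ : Int) (out : Int) : Decidable (Spec_coordsGridLocalToNumber argX argY argZ out) := by unfold Spec_coordsGridLocalToNumber; infer_instance

-- ===== CLAIM (what is proved, stated in full; the proofs are below) =====
def Claim_equal_coordsGridLocalToNumber : Prop := ∀ (argX : Int) (argY : Int) (argZ : Int), Dom_coordsGridLocalToNumber argX argY argZ → Spec_coordsGridLocalToNumber argX argY argZ (coordsGridLocalToNumber argX argY argZ)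

-- ===== LEMMAS AND PROOFS =====

-- closed-form value of the loop's total increment after k iterations
def pvT (k : Nat) : Int :=
  if (k : Int) ≤ 16 then 16 * k + (k : Int) * ((k : Int) - 1) / 2
  else 376 + 30 * ((k : Int) - 16) - ((k : Int) - 16) * ((k : Int) - 17) / 2

theorem pvT_succ (k : Nat) :
    pvT (k + 1) = pvT k + (if (k : Int) < 16 then 16 + (k : Int) else 30 - ((k : Int) - 16)) := by
  by_cases hk : k = 16
  · subst hk; decide
  · have hk' : (k : Int) ≠ 16 := by exact_mod_cast hk
    unfold pvT
    push_cast
    have h1 : ((k : Int) + 1) * ((k : Int) + 1 - 1) = (k : Int) * ((k : Int) - 1) + 2 * (k : Int) := by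
      ring
    have h2 : ((k : Int) + 1 - 16) * ((k : Int) + 1 - 17)
        = ((k : Int) - 16) * ((k : Int) - 17) + 2 * ((k : Int) - 16) := by ring
    split_ifs <;> omega

theorem pv_loop (k : Nat) (c : Int) :
    (List.range k).foldl
      (fun (x : Int) (y : Nat) =>
        x + (if (y : Int) < ChunkSize then ChunkSize + (y : Int)
             else ChunkLength - 1 - ((y : Int) - ChunkSize)))
      c = c + pvT k := by
  induction k generalizing c with
  | zero => simp [pvT]
  | succ k ih =>
    rw [List.range_succ, List.foldl_append, ih]
    simp only [List.foldl_cons, List.foldl_nil, pvT_succ, ChunkSize, ChunkLength]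
    split_ifs <;> ring

theorem pvT_int (n : Int) (hn : 0 ≤ n) :
    pvT n.toNat =
      if n ≤ 16 then 16 * n + n * (n - 1) / 2
      else 376 + 30 * (n - 16) - (n - 16) * (n - 17) / 2 := by
  unfold pvT
  rw [Int.toNat_of_nonneg hn]

-- ===== VERDICT (by name: the statement is the Claim_ definition above) =====
theorem coordsGridLocalToNumber_spec : Claim_equal_coordsGridLocalToNumber := by
  intro argX argY argZ _
  unfold Spec_coordsGridLocalToNumber coordsGridLocalToNumber coordsGridLocalToNumber_alt
  simp only [PySem.List.pyRange_one]
  rw [List.foldl_map]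
  simp only [zero_add]
  rw [pv_loop]
  have hbase : (if argZ > 0 then argX + ChunkSize - 1 else argY + ChunkSize - 1)
      = (if argZ > 0 then argX else argY) + ChunkSize - 1 := by split_ifs <;> ring
  rw [hbase]
  simp only [ChunkSize, ChunkLength]
  have h0 : argZ + 16 - 1 - 0 = argZ + 16 - 1 := by ring
  rw [h0]
  by_cases hn : argZ + 16 - 1 ≤ 0
  · have ht : (argZ + 16 - 1).toNat = 0 := by omega
    rw [ht, if_pos hn]
    norm_num [pvT]
  · rw [not_le] at hn
    rw [pvT_int _ (le_of_lt hn), if_neg (not_le.mpr hn)]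
    have e1 : (argZ + 16 - 1 - 16) * (argZ + 16 - 1 - 16 - 1)
        = (argZ + 16 - 1 - 16) * (argZ + 16 - 1 - 17) := by ring
    split_ifs <;> omega
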